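-- pv_equiv track=rewrite | github.com/haebzzzang/Coding_Test | Programmers/Lv.0/옹알이.py | solution
-- ===== SOURCE A (Python) =====
-- from itertools import permutations
--
-- def solution(babbling) :
--     answer = 0
--     word = ["aya", "ye", "woo", "ma"]
--     bab = []
--
--     # range(len(word))로 실행하면 안 됨
--     # python은 index가 0부터 시작하기 때문에, permutations(word, 0)이 되어버리면 0개의 원소를 골라 순열을 생성하는 것이기 때문
--     # len(word)로 마지막 index를 설정하면, 모든 조합이 나오지 않음
--     # index를 1부터 시작하지 않으면 런타임 에러 뜸
--     for i in range(1, len(word)+1) :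
--         for j in permutations(word, i) :
--             # 리스트 안의 문자열들을 구분자를 기준으로 합쳐줌
--             bab.append("".join(j))
--
--     for i in babbling :
--         if i in bab :
--             answer += 1
--
--     return answer
-- ===== SOURCE B (Python) =====
-- def solution(babbling):
--     syllables = ["aya", "ye", "woo", "ma"]
--
--     def parses(word):
--         # greedy parse: the four syllables have distinct first letters,
--         # so at most one can match at any position (no backtracking needed)
--         if not word:
--             return False
--         used = set()
--         i = 0
--         while i < len(word):
--             for s in syllables:
--                 if word.startswith(s, i) and s not in used:
--                     used.add(s)
--                     i += len(s)
--                     break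
--             else:
--                 return False
--         return True
--
--     return sum(1 for w in babbling if parses(w))
-- ===== Notes on version B (the rewrite author's own statement) =====
-- stated objective: simpler
-- what changed: B replaces A's precomputation of all 64 permutation-concatenations followed by a list membership scan with a direct greedy left-to-right parse of each word (a cursor plus a used-syllable set; the four syllables have distinct first letters so no backtracking is needed).
import Mathlib
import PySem

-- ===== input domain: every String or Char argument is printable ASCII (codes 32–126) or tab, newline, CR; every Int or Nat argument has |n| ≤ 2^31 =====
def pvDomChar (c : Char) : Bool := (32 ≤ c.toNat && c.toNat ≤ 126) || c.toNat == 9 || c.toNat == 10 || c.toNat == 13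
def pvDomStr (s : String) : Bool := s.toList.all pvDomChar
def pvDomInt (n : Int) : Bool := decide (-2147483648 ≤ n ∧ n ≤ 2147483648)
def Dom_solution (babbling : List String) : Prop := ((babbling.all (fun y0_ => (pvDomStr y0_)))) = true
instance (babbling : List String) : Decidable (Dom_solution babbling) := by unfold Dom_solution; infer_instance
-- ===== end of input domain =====

-- B replaces A's precomputed list of all permutation-concatenations by a greedy parse of each word (simpler, no precomputation); equivalent count.

-- ===== PORT A =====
-- word = ["aya", "ye", "woo", "ma"]
def babWord : List String := ["aya", "ye", "woo", "ma"]

-- bab: for i in range(1, len(word)+1): for j in permutations(word, i): bab.append("".join(j))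
def babList : List String :=
  (PySem.List.pyRange 1 ((babWord.length : Int) + 1) 1).foldl
    (fun bab i =>
      (PySem.List.permutations babWord i.toNat).foldl
        (fun bab j => bab ++ [PySem.Str.join "" j]) bab)
    []

def solution (babbling : List String) : Int :=
  babbling.foldl (fun answer i => if i ∈ babList then answer + 1 else answer) 0

-- ===== PORT B =====
def sylB : List String := ["aya", "ye", "woo", "ma"]

-- the while loop of Source B's `parses`; fuel = |word| bounds the iteration count (each step consumes ≥ 1 char)
def goB : Nat → List Char → PySem.Set String → Bool
  | 0, cs, _ => cs.isEmpty
  | fuel + 1, cs, used =>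
    if cs = [] then true
    else
      match sylB.find? (fun s => PySem.Chars.startswith cs s.toList && !(PySem.Set.contains used s)) with
      | none => false
      | some s => goB fuel (cs.drop s.toList.length) (PySem.Set.add used s)

def parsesB (w : String) : Bool :=
  if w.toList = [] then false
  else goB w.toList.length w.toList PySem.Set.empty

def solution_alt (babbling : List String) : Int :=
  babbling.foldl (fun count w => if parsesB w then count + 1 else count) 0

-- ===== PRECONDITION & SPEC =====
def Spec_solution (babbling : List String) (out : Int) : Prop := out = solution_alt babbling
instance (babbling : List String) (out : Int) : Decidable (Spec_solution babbling out) := by unfold Spec_solution; infer_instance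

-- ===== CLAIM (what is proved, stated in full; the proofs are below) =====
def Claim_equal_solution : Prop := ∀ (babbling : List String), Dom_solution babbling → Spec_solution babbling (solution babbling)

-- ===== LEMMAS AND PROOFS =====

-- every word of A's list is accepted by B's greedy parser (finite check)
lemma bab_accepted : ∀ w ∈ babList, parsesB w = true := by decide

-- every join of 1..4 pairwise-distinct syllables is in A's list (finite checks)
lemma join1_mem : ∀ a ∈ sylB, PySem.Str.join "" [a] ∈ babList := by decide

lemma join2_mem : ∀ a ∈ sylB, ∀ b ∈ sylB, ([a, b] : List String).Nodup →
    PySem.Str.join "" [a, b] ∈ babList := by decide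

lemma join3_mem : ∀ a ∈ sylB, ∀ b ∈ sylB, ∀ c ∈ sylB, ([a, b, c] : List String).Nodup →
    PySem.Str.join "" [a, b, c] ∈ babList := by decide

lemma join4_mem : ∀ a ∈ sylB, ∀ b ∈ sylB, ∀ c ∈ sylB, ∀ d ∈ sylB,
    ([a, b, c, d] : List String).Nodup →
    PySem.Str.join "" [a, b, c, d] ∈ babList := by decide

lemma join_mem_bab : ∀ L : List String, L.Nodup → (∀ s ∈ L, s ∈ sylB) → L ≠ [] →
    PySem.Str.join "" L ∈ babList := by
  intro L hnd hsyl hne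
  have hlen : L.length ≤ 4 := by
    have h := (List.subperm_of_subset hnd (fun s hs => hsyl s hs)).length_le
    simpa [sylB] using h
  match L, hnd, hsyl, hne, hlen with
  | [], _, _, hne, _ => exact absurd rfl hne
  | [a], _, hsyl, _, _ =>
    exact join1_mem a (hsyl a (by simp))
  | [a, b], hnd, hsyl, _, _ =>
    exact join2_mem a (hsyl a (by simp)) b (hsyl b (by simp)) hnd
  | [a, b, c], hnd, hsyl, _, _ =>
    exact join3_mem a (hsyl a (by simp)) b (hsyl b (by simp)) c (hsyl c (by simp)) hnd
  | [a, b, c, d], hnd, hsyl, _, _ =>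
    exact join4_mem a (hsyl a (by simp)) b (hsyl b (by simp)) c (hsyl c (by simp))
      d (hsyl d (by simp)) hnd
  | a :: b :: c :: d :: e :: L, _, _, _, hlen => simp at hlen; omega

-- soundness of the greedy parser: an accepted word decomposes into distinct unused syllables
lemma goB_sound : ∀ (fuel : Nat) (cs : List Char) (used : PySem.Set String),
    goB fuel cs used = true →
    ∃ L : List String, L.Nodup ∧ (∀ s ∈ L, s ∈ sylB) ∧
      (∀ s ∈ L, s ∉ used) ∧
      cs = (L.map String.toList).flatten := by
  intro fuel
  induction fuel with
  | zero =>
    intro cs used h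
    simp only [goB, List.isEmpty_iff] at h
    exact ⟨[], by simp [h]⟩
  | succ fuel ih =>
    intro cs used h
    by_cases hcs : cs = []
    · exact ⟨[], by simp [hcs]⟩
    · rw [goB, if_neg hcs] at h
      split at h
      · exact absurd h (by simp)
      · rename_i s h2
        have hpred := List.find?_some h2
        simp only [Bool.and_eq_true, Bool.not_eq_true',
          PySem.Set.contains_eq_decide, decide_eq_false_iff_not] at hpred
        have hprefix : s.toList <+: cs := (PySem.Chars.startswith_iff _ _).mp hpred.1
        obtain ⟨t, ht⟩ := hprefix
        have hdrop : cs.drop s.toList.length = t := by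
          rw [← ht, List.drop_left]
        obtain ⟨L', hnd, hsyl, hused, heq⟩ := ih _ _ h
        refine ⟨s :: L', ?_, ?_, ?_, ?_⟩
        · refine List.nodup_cons.mpr ⟨?_, hnd⟩
          intro hmem
          exact hused s hmem ((PySem.Set.mem_add used s s).mpr (Or.inr rfl))
        · intro x hx
          rcases List.mem_cons.mp hx with rfl | hx
          · exact List.mem_of_find?_eq_some h2
          · exact hsyl _ hx
        · intro x hx
          rcases List.mem_cons.mp hx with rfl | hx
          · exact hpred.2
          · exact fun hxu => hused x hx ((PySem.Set.mem_add used s x).mpr (Or.inl hxu))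
        · rw [List.map_cons, List.flatten_cons, ← heq, hdrop, ← ht]

lemma chars_join_nil_flatten : ∀ (ls : List (List Char)),
    PySem.Chars.join [] ls = ls.flatten := by
  intro ls
  induction ls with
  | nil => simp [PySem.Chars.join_nil]
  | cons a tl ih =>
    cases tl with
    | nil => simp [PySem.Chars.join_singleton]
    | cons b rest =>
      rw [PySem.Chars.join_cons_cons, ih, List.flatten_cons]
      simp

-- the per-word equivalence
lemma word_iff (w : String) : w ∈ babList ↔ parsesB w = true := by
  constructor
  · exact fun h => bab_accepted w h
  · intro h
    unfold parsesB at h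
    by_cases hw : w.toList = []
    · rw [if_pos hw] at h; exact absurd h (by simp)
    · rw [if_neg hw] at h
      obtain ⟨L, hnd, hsyl, -, heq⟩ := goB_sound _ _ _ h
      have hLne : L ≠ [] := by
        rintro rfl
        exact hw heq
      have hmem := join_mem_bab L hnd hsyl hLne
      have hjoin : (PySem.Str.join "" L).toList = w.toList := by
        rw [PySem.Str.toList_join]
        rw [show ("" : String).toList = [] from rfl, chars_join_nil_flatten, ← heq]
      exact (String.toList_inj.mp hjoin) ▸ hmem

lemma fold_eq : ∀ (l : List String) (acc : Int),
    l.foldl (fun answer i => if i ∈ babList then answer + 1 else answer) acc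
      = l.foldl (fun count w => if parsesB w then count + 1 else count) acc := by
  intro l
  induction l with
  | nil => intro acc; rfl
  | cons w tl ih =>
    intro acc
    simp only [List.foldl_cons]
    rw [if_congr (word_iff w) rfl rfl]
    exact ih _

-- ===== VERDICT (by name: the statement is the Claim_ definition above) =====
theorem solution_spec : Claim_equal_solution := by
  intro babbling _
  show solution babbling = solution_alt babbling
  unfold solution solution_alt
  exact fold_eq babbling 0
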